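-- pv_equiv track=rewrite | github.com/MariaMsu/Info_Search | HW_5/indexer.py | make_bigram
-- ===== SOURCE A (Python) =====
-- def make_bigram(string):
--     if not string:
--         return ["^_"]
--     new_string = ["^" + string[0]]
--     for i in range(len(string) - 1):
--         new_string += [string[i:i + 2]]
--     new_string += [string[-1:] + "_"]
--     return new_string
-- ===== SOURCE B (Python) =====
-- def make_bigram(string):
--     padded = "^" + string + "_"
--     return [padded[i:i + 2] for i in range(len(padded) - 1)]
-- ===== Notes on version B (the rewrite author's own statement) =====
-- stated objective: simpler
-- what changed: B pads the string with the boundary markers once and takes all adjacent bigrams of the padded string in a single uniform comprehension, removing A's empty-string special case and its separate head/interior/tail construction.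
import Mathlib
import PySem

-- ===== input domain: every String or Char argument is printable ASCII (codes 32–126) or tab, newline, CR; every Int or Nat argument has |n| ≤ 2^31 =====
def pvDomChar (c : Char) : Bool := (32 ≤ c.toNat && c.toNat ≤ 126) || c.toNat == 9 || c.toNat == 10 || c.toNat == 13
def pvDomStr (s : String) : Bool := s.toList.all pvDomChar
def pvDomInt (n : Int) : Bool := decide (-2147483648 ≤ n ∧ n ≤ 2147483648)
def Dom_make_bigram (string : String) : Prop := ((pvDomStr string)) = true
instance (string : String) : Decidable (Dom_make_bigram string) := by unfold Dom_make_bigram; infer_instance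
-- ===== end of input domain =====

-- B pads the string with the boundary markers once and takes all adjacent bigrams in one
-- uniform sweep, removing A's empty-string special case and separate head/tail construction (objective: simpler).
-- ===== PORT A =====
def make_bigram (string : String) : List String :=
  match string.toList with
  | [] => ["^_"]
  | c :: rest =>
    ((PySem.List.pyRange 0 (PySem.Str.len string - 1) 1).foldl
        (fun acc i => acc ++ [String.ofList (PySem.Chars.slice (c :: rest) (some i) (some (i + 2)))])
        [String.ofList ['^', c]])
      ++ [String.ofList (PySem.Chars.slice (c :: rest) (some (-1)) none ++ ['_'])]

-- ===== PORT B =====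
def make_bigram_alt (string : String) : List String :=
  let padded := '^' :: (string.toList ++ ['_'])
  (PySem.List.pyRange 0 ((padded.length : Int) - 1) 1).map
    (fun i => String.ofList (PySem.Chars.slice padded (some i) (some (i + 2))))

-- ===== PRECONDITION & SPEC =====
def Spec_make_bigram (string : String) (out : List String) : Prop := out = make_bigram_alt string
instance (string : String) (out : List String) : Decidable (Spec_make_bigram string out) := by unfold Spec_make_bigram; infer_instance

-- ===== CLAIM (what is proved, stated in full; the proofs are below) =====
def Claim_equal_make_bigram : Prop := ∀ (string : String), Dom_make_bigram string → Spec_make_bigram string (make_bigram string)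

-- ===== LEMMAS AND PROOFS =====

-- adjacent bigrams of a character list, as both ports ultimately compute them
def pvPairs : List Char → List String
  | a :: b :: t => String.ofList [a, b] :: pvPairs (b :: t)
  | _ => []

lemma map_range_bigrams (p : List Char) :
    (List.range (p.length - 1)).map (fun k => String.ofList ((p.drop k).take 2)) = pvPairs p := by
  induction p with
  | nil => simp [pvPairs]
  | cons a p ih =>
    cases p with
    | nil => simp [pvPairs]
    | cons b t =>
      simp only [List.length_cons, Nat.add_sub_cancel, List.range_succ_eq_map,
        List.map_cons, List.map_map, pvPairs]
      rw [← ih]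
      simp [Function.comp]

lemma pyRange_map_slice (p : List Char) :
    (PySem.List.pyRange 0 ((p.length : Int) - 1) 1).map
      (fun i => String.ofList (PySem.Chars.slice p (some i) (some (i + 2)))) =
    (List.range (p.length - 1)).map (fun k => String.ofList ((p.drop k).take 2)) := by
  rw [PySem.List.pyRange_one, List.map_map]
  have hlen : ((p.length : Int) - 1 - 0).toNat = p.length - 1 := by omega
  rw [hlen]
  apply List.map_congr_left
  intro k _
  simp only [Function.comp, zero_add, PySem.Chars.slice_eq_listSlice]
  have h2 : ((k : Int) + 2) = ((k : Int) + ((2 : Nat) : Int)) := by norm_num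
  rw [h2, PySem.List.slice_natCast_add]

lemma pairs_append_last (s : List Char) (h : s ≠ []) :
    pvPairs (s ++ ['_']) =
      (List.range (s.length - 1)).map (fun k => String.ofList ((s.drop k).take 2))
        ++ [String.ofList [s.getLast h, '_']] := by
  induction s with
  | nil => exact absurd rfl h
  | cons a s ih =>
    cases s with
    | nil => simp [pvPairs]
    | cons b t =>
      simp only [List.cons_append, pvPairs, List.length_cons, Nat.add_sub_cancel,
        List.range_succ_eq_map, List.map_cons, List.map_map]
      have hih := ih (by simp)
      rw [List.cons_append] at hih
      rw [hih]
      simp [Function.comp, List.getLast]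

lemma alt_eq_pairs (string : String) :
    make_bigram_alt string = pvPairs ('^' :: (string.toList ++ ['_'])) := by
  unfold make_bigram_alt
  rw [pyRange_map_slice, map_range_bigrams]

-- ===== VERDICT (by name: the statement is the Claim_ definition above) =====
lemma make_bigram_nil (string : String) (hs : string.toList = []) :
    make_bigram string = ["^_"] := by
  unfold make_bigram; rw [hs]

lemma make_bigram_cons (string : String) (c : Char) (rest : List Char)
    (hs : string.toList = c :: rest) :
    make_bigram string =
      ((PySem.List.pyRange 0 (PySem.Str.len string - 1) 1).foldl
          (fun acc i => acc ++ [String.ofList (PySem.Chars.slice (c :: rest) (some i) (some (i + 2)))])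
          [String.ofList ['^', c]])
        ++ [String.ofList (PySem.Chars.slice (c :: rest) (some (-1)) none ++ ['_'])] := by
  unfold make_bigram; rw [hs]

theorem make_bigram_spec : Claim_equal_make_bigram := by
  intro string _
  unfold Spec_make_bigram
  rw [alt_eq_pairs]
  cases hs : string.toList with
  | nil => rw [make_bigram_nil string hs]; decide
  | cons c rest =>
    rw [make_bigram_cons string c rest hs,
      PySem.List.foldl_append_singleton_eq_map]
    have hlen : PySem.Str.len string - 1 = (((c :: rest).length : Int) - 1) := by
      simp [hs]
    rw [hlen, pyRange_map_slice, map_range_bigrams]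
    have hr : pvPairs ('^' :: (c :: rest ++ ['_'])) =
        String.ofList ['^', c] :: pvPairs ((c :: rest) ++ ['_']) := rfl
    rw [hr, pairs_append_last (c :: rest) (by simp), map_range_bigrams]
    rw [PySem.Chars.slice_eq_listSlice, PySem.List.slice_from_neg_one,
      List.drop_length_sub_one (by simp)]
    simp
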